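-- pv_equiv track=rewrite | github.com/pakutonzz/OOD | CH02_Python2/2_5.py | bon
-- ===== SOURCE A (Python) =====
-- def bon(w):
--     repeat_chars = {}
--     for char in w:
--         if w.count(char) > 1:
--             if char not in repeat_chars:
--                 repeat_chars[char] = w.count(char)
--
--     value = 0
--     for char in repeat_chars.keys() :
--         value += ord(char)-96
--
--     return value*4
-- ===== SOURCE B (Python) =====
-- def bon(w):
--     # Sort the characters, then sweep the sorted list run by run:
--     # each run of length > 1 is a repeated character, counted once.
--     def runs(s):
--         if not s:
--             return 0
--         c = s[0]
--         rest = s[1:]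
--         k = 0
--         while k < len(rest) and rest[k] == c:
--             k += 1
--         contrib = ord(c) - 96 if k > 0 else 0
--         return contrib + runs(rest[k:])
--
--     return runs(sorted(w)) * 4
-- ===== Notes on version B (the rewrite author's own statement) =====
-- stated objective: faster
-- what changed: Replaces the per-character w.count scans plus a seen-dict with a sort followed by a single run-by-run sweep of the sorted characters, adding each repeated character's contribution once.
import Mathlib
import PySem

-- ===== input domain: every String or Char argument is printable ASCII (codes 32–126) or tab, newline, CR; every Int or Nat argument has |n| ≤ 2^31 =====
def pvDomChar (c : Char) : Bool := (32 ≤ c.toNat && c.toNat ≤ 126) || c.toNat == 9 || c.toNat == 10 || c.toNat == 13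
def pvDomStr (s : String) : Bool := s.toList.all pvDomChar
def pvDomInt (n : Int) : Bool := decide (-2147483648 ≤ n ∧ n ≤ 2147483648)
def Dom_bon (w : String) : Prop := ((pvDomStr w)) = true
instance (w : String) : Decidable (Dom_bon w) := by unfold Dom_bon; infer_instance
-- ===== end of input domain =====

-- B sorts the characters and sweeps the sorted list run by run instead of A's
-- per-character count scans into a seen-dict; same return value, O(n log n) vs O(n^2).

-- ===== PORT A =====
def bon (w : String) : Int :=
  let rc : PySem.Dict Char Int :=
    w.toList.foldl (fun (d : PySem.Dict Char Int) c =>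
      if 1 < PySem.Str.count w (String.ofList [c]) then
        if d.contains c = false then d.insert c ((PySem.Str.count w (String.ofList [c]) : Int)) else d
      else d) PySem.Dict.empty
  let value : Int := rc.keys.foldl (fun v c => v + (((c.toNat : Int)) - 96)) 0
  value * 4

-- ===== PORT B =====
-- the recursive run-by-run sweep of Source B's `runs` (takeWhile/dropWhile = the inner index scan)
def bonRuns : List Char → Int
  | [] => 0
  | c :: rest =>
      let run := rest.takeWhile (fun x => x == c)
      let tail := rest.dropWhile (fun x => x == c)
      (if 0 < run.length then ((c.toNat : Int)) - 96 else 0) + bonRuns tail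
termination_by l => l.length
decreasing_by
  simpa using Nat.lt_succ_of_le (List.length_dropWhile_le _ rest)

def bon_alt (w : String) : Int :=
  bonRuns (PySem.List.sorted w.toList (fun c => c)) * 4

-- ===== PRECONDITION & SPEC =====
def Spec_bon (w : String) (out : Int) : Prop := out = bon_alt w
instance (w : String) (out : Int) : Decidable (Spec_bon w out) := by unfold Spec_bon; infer_instance

-- ===== CLAIM (what is proved, stated in full; the proofs are below) =====
def Claim_equal_bon : Prop := ∀ (w : String), Dom_bon w → Spec_bon w (bon w)

-- ===== LEMMAS AND PROOFS =====

-- contribution of one character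
def bonF (c : Char) : Int := ((c.toNat : Int)) - 96

-- w.count(char) for a single character is the character count of the list
lemma chars_count_go_singleton (c : Char) (l : List Char) (fuel acc : Nat)
    (h : l.length ≤ fuel) :
    PySem.Chars.count.go [c] fuel l acc = acc + l.count c := by
  induction l generalizing fuel acc with
  | nil =>
    cases fuel <;> simp [PySem.Chars.count.go]
  | cons x t ih =>
    cases fuel with
    | zero => simp at h
    | succ m =>
      by_cases hx : c = x
      · subst hx
        have hstep : PySem.Chars.count.go [c] (m + 1) (c :: t) acc =
            PySem.Chars.count.go [c] m t (acc + 1) := by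
          simp [PySem.Chars.count.go, List.isPrefixOf]
        rw [hstep, ih m (acc + 1) (by simpa using h)]
        simp
        omega
      · have hbeq : ([c].isPrefixOf (x :: t)) = false := by
          simp [List.isPrefixOf, hx]
        have hstep : PySem.Chars.count.go [c] (m + 1) (x :: t) acc =
            PySem.Chars.count.go [c] m t acc := by
          simp [PySem.Chars.count.go, hbeq]
        rw [hstep, ih m acc (by simpa using h)]
        simp [Ne.symm hx]

lemma str_count_singleton (w : String) (c : Char) :
    PySem.Str.count w (String.ofList [c]) = w.toList.count c := by
  have h0 : PySem.Chars.count w.toList [c] = w.toList.count c := by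
    rw [PySem.Chars.count]
    simpa using chars_count_go_singleton c w.toList w.toList.length 0 le_rfl
  simpa [PySem.Str.count] using h0

-- ---- A side: the dict's keys are nodup and are exactly the repeated characters ----

def bonStep (full : List Char) (d : PySem.Dict Char Int) (c : Char) : PySem.Dict Char Int :=
  if 1 < full.count c then
    if d.contains c = false then d.insert c ((full.count c : Int)) else d
  else d

lemma foldA_keys (full : List Char) (l : List Char) (d : PySem.Dict Char Int)
    (hnd : d.keys.Nodup) :
    (l.foldl (bonStep full) d).keys.Nodup ∧
      (∀ x, x ∈ (l.foldl (bonStep full) d).keys ↔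
        x ∈ d.keys ∨ (x ∈ l ∧ 1 < full.count x)) := by
  induction l generalizing d with
  | nil => simp [hnd]
  | cons c t ih =>
    simp only [List.foldl_cons]
    by_cases hc : 1 < full.count c
    · by_cases hmem : c ∈ d.keys
      · have hcont : d.contains c = true := (PySem.Dict.contains_iff_mem_keys d c).mpr hmem
        have hstep : bonStep full d c = d := by
          simp [bonStep, hc, hcont]
        rw [hstep]
        obtain ⟨h1, h2⟩ := ih d hnd
        refine ⟨h1, fun x => ?_⟩
        rw [h2 x]
        constructor
        · rintro (h | ⟨hx, hcnt⟩)
          · exact Or.inl h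
          · exact Or.inr ⟨List.mem_cons_of_mem _ hx, hcnt⟩
        · rintro (h | ⟨hx, hcnt⟩)
          · exact Or.inl h
          · rcases List.mem_cons.mp hx with rfl | hx
            · exact Or.inl hmem
            · exact Or.inr ⟨hx, hcnt⟩
      · have hcont : d.contains c = false := by
          cases h : d.contains c
          · rfl
          · exact absurd ((PySem.Dict.contains_iff_mem_keys d c).mp h) hmem
        have hstep : bonStep full d c = d.insert c ((full.count c : Int)) := by
          simp [bonStep, hc, hcont]
        rw [hstep]
        have hkeys := PySem.Dict.keys_insert_of_not_contains d ((full.count c : Int)) hcont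
        have hnd' : (d.insert c ((full.count c : Int))).keys.Nodup := by
          rw [hkeys]
          exact List.Nodup.append hnd (List.nodup_singleton c) (by simpa using hmem)
        obtain ⟨h1, h2⟩ := ih _ hnd'
        refine ⟨h1, fun x => ?_⟩
        rw [h2 x, hkeys]
        simp only [List.mem_append, List.mem_cons, List.not_mem_nil, or_false]
        constructor
        · rintro ((h | rfl) | ⟨hx, hcnt⟩)
          · exact Or.inl h
          · exact Or.inr ⟨Or.inl rfl, hc⟩
          · exact Or.inr ⟨Or.inr hx, hcnt⟩
        · rintro (h | ⟨rfl | hx, hcnt⟩)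
          · exact Or.inl (Or.inl h)
          · exact Or.inl (Or.inr rfl)
          · exact Or.inr ⟨hx, hcnt⟩
    · have hstep : bonStep full d c = d := by simp [bonStep, hc]
      rw [hstep]
      obtain ⟨h1, h2⟩ := ih d hnd
      refine ⟨h1, fun x => ?_⟩
      rw [h2 x]
      constructor
      · rintro (h | ⟨hx, hcnt⟩)
        · exact Or.inl h
        · exact Or.inr ⟨List.mem_cons_of_mem _ hx, hcnt⟩
      · rintro (h | ⟨hx, hcnt⟩)
        · exact Or.inl h
        · rcases List.mem_cons.mp hx with rfl | hx
          · exact absurd hcnt hc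
          · exact Or.inr ⟨hx, hcnt⟩

-- A's value equals the Finset sum over the repeated characters
lemma bon_eq_sum (w : String) :
    bon w = (∑ c ∈ w.toList.toFinset with 1 < w.toList.count c, bonF c) * 4 := by
  have hfun : (fun (d : PySem.Dict Char Int) c =>
      if 1 < PySem.Str.count w (String.ofList [c]) then
        if d.contains c = false then d.insert c ((PySem.Str.count w (String.ofList [c]) : Int)) else d
      else d) = bonStep w.toList := by
    funext d c
    rw [str_count_singleton w c]
    rfl
  obtain ⟨hnd, hmem⟩ := foldA_keys w.toList w.toList PySem.Dict.empty (by simp [PySem.Dict.empty])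
  set ks := (w.toList.foldl (bonStep w.toList) PySem.Dict.empty).keys with hks
  have hbon : bon w = ks.foldl (fun v c => v + (((c.toNat : Int)) - 96)) 0 * 4 := by
    simp only [bon, hfun, hks]
  have htf : ks.toFinset = w.toList.toFinset.filter (fun c => 1 < w.toList.count c) := by
    ext x
    simp only [List.mem_toFinset, Finset.mem_filter, hmem x]
    simp [PySem.Dict.empty]
  have hsum : ks.foldl (fun v c => v + (((c.toNat : Int)) - 96)) 0 = (ks.map bonF).sum := by
    simpa [bonF] using PySem.List.foldl_add ks bonF 0
  rw [hbon, hsum, ← List.sum_toFinset bonF hnd, htf]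

-- ---- B side ----

lemma dropWhile_ne_of_sorted (c : Char) (l : List Char)
    (hp : l.Pairwise (· ≤ ·)) (hge : ∀ x ∈ l, c ≤ x) :
    ∀ x ∈ l.dropWhile (fun x => x == c), x ≠ c := by
  induction l with
  | nil => simp
  | cons h t ih =>
    by_cases hh : h = c
    · subst hh
      simp only [List.dropWhile_cons, BEq.rfl, if_true]
      exact ih (hp.of_cons) (fun x hx => hge x (List.mem_cons_of_mem _ hx))
    · have hbeq : (h == c) = false := by simp [hh]
      simp only [List.dropWhile_cons, hbeq]
      intro x hx
      rcases List.mem_cons.mp hx with rfl | hx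
      · exact hh
      · have hcx : c < h := lt_of_le_of_ne (hge h (List.mem_cons_self)) (Ne.symm hh)
        have : h ≤ x := (List.pairwise_cons.mp hp).1 x hx
        exact fun hxc => absurd (hxc ▸ this) (not_le.mpr hcx)

lemma bonRuns_eq_sum (s : List Char) (hp : s.Pairwise (· ≤ ·)) :
    bonRuns s = ∑ c ∈ s.toFinset, (if 1 < s.count c then bonF c else 0) := by
  induction s using bonRuns.induct with
  | case1 => simp [bonRuns]
  | case2 c rest tl ih =>
    set run := rest.takeWhile (fun x => x == c) with hrun
    set tail := rest.dropWhile (fun x => x == c) with htaildef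
    have hpr : rest.Pairwise (· ≤ ·) := hp.of_cons
    have hge : ∀ x ∈ rest, c ≤ x := (List.pairwise_cons.mp hp).1
    have htail_ne : ∀ x ∈ tail, x ≠ c := dropWhile_ne_of_sorted c rest hpr hge
    have hpt : tail.Pairwise (· ≤ ·) := hpr.sublist (List.dropWhile_sublist _)
    have hsplit : run ++ tail = rest := List.takeWhile_append_dropWhile
    have hrun_all : ∀ x ∈ run, x = c := by
      intro x hx
      simpa using List.mem_takeWhile_imp hx
    -- counts
    have hcount_run : run.count c = run.length :=
      List.count_eq_length.mpr (fun b hb => (hrun_all b hb).symm)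
    have hcount_tail : tail.count c = 0 :=
      List.count_eq_zero.mpr (fun h => htail_ne c h rfl)
    have hcount_c : (c :: rest).count c = run.length + 1 := by
      rw [← hsplit]
      simp [List.count_append, hcount_run, hcount_tail]
    have hcount_ne : ∀ x ≠ c, (c :: rest).count x = tail.count x := by
      intro x hxc
      rw [← hsplit]
      have : run.count x = 0 :=
        List.count_eq_zero.mpr (fun h => hxc (hrun_all x h))
      simp [List.count_append, this, Ne.symm hxc]
    -- finsets
    have hcnotin : c ∉ tail.toFinset := by
      intro h
      exact htail_ne c (List.mem_toFinset.mp h) rfl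
    have htf : (c :: rest).toFinset = insert c tail.toFinset := by
      ext x
      simp only [List.toFinset_cons, Finset.mem_insert, List.mem_toFinset]
      rw [← hsplit]
      constructor
      · rintro (rfl | hx)
        · exact Or.inl rfl
        · rcases List.mem_append.mp hx with hx | hx
          · exact Or.inl (hrun_all x hx)
          · exact Or.inr hx
      · rintro (rfl | hx)
        · exact Or.inl rfl
        · exact Or.inr (List.mem_append_right _ hx)
    have hb : bonRuns (c :: rest) =
        (if 0 < run.length then bonF c else 0) + bonRuns tail := by
      simp only [bonRuns, bonF, hrun, htaildef]
    rw [hb]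
    rw [htf, Finset.sum_insert hcnotin, ih hpt]
    congr 1
    · rw [hcount_c]
      by_cases h : 0 < run.length
      · rw [if_pos h, if_pos (by omega)]
      · rw [if_neg h, if_neg (by omega)]
    · refine Finset.sum_congr rfl (fun x hx => ?_)
      have hxc : x ≠ c := fun h => hcnotin (h ▸ hx)
      rw [hcount_ne x hxc]

lemma bon_alt_eq_sum (w : String) :
    bon_alt w = (∑ c ∈ w.toList.toFinset with 1 < w.toList.count c, bonF c) * 4 := by
  unfold bon_alt
  set s := PySem.List.sorted w.toList (fun c => c) with hs
  have hperm : s.Perm w.toList := PySem.List.sorted_perm w.toList (fun c => c) false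
  have hp : s.Pairwise (· ≤ ·) := by
    simpa using PySem.List.sorted_pairwise w.toList (fun c => c)
  rw [bonRuns_eq_sum s hp]
  have htf : s.toFinset = w.toList.toFinset := by
    ext x; simp [List.mem_toFinset, hperm.mem_iff]
  have hcnt : ∀ x, s.count x = w.toList.count x := fun x => hperm.count_eq x
  rw [htf, Finset.sum_filter]
  congr 1
  exact Finset.sum_congr rfl (fun x _ => by rw [hcnt x])

-- ===== VERDICT (by name: the statement is the Claim_ definition above) =====
theorem bon_spec : Claim_equal_bon := by
  intro w _
  unfold Spec_bon
  rw [bon_eq_sum w, bon_alt_eq_sum w]
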